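-- pv_equiv track=rewrite | github.com/dannyxiaocn/nutshell | toolhub/grep/executor.py | _expand_context
-- ===== SOURCE A (Python) =====
-- def _expand_context(matched: list[int], ctx: int, total_lines: int) -> list[int]:
--     if ctx <= 0:
--         return matched
--     wanted: set[int] = set()
--     for i in matched:
--         lo = max(0, i - ctx)
--         hi = min(total_lines - 1, i + ctx)
--         wanted.update(range(lo, hi + 1))
--     return sorted(wanted)
-- ===== SOURCE B (Python) =====
-- def _expand_context(matched: list[int], ctx: int, total_lines: int) -> list[int]:
--     if ctx <= 0:
--         return matched
--     # Merge the clamped [i-ctx, i+ctx] windows of the sorted matches into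
--     # disjoint intervals, then flatten them: sorted unique output, no set.
--     intervals: list[list[int]] = []
--     for i in sorted(matched):
--         lo = max(0, i - ctx)
--         hi = min(total_lines - 1, i + ctx)
--         if hi < lo:
--             continue
--         if intervals and lo <= intervals[-1][1] + 1:
--             if hi > intervals[-1][1]:
--                 intervals[-1][1] = hi
--         else:
--             intervals.append([lo, hi])
--     out: list[int] = []
--     for lo, hi in intervals:
--         out.extend(range(lo, hi + 1))
--     return out
-- ===== Notes on version B (the rewrite author's own statement) =====
-- stated objective: faster
-- what changed: Instead of unioning every clamped context window element-by-element into a global set and sorting it at the end, B sorts the matches once, merges their clamped windows left-to-right into disjoint intervals, and flattens the intervals in order, so no per-element set insertions and no final sort of the output are needed.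
import Mathlib
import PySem

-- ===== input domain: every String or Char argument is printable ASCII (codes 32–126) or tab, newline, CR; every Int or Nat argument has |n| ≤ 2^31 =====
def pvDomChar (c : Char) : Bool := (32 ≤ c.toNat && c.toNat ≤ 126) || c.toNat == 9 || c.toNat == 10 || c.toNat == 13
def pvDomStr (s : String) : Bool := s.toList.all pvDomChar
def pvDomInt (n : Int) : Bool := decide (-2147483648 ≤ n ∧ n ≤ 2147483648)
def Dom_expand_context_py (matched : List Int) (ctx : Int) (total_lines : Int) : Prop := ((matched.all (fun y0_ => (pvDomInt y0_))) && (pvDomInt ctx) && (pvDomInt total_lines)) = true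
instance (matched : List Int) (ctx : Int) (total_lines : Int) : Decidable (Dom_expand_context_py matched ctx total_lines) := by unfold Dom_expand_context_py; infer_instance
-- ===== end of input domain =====

-- B replaces A's global set-union-then-sort by sorting the matches once and merging
-- their clamped context windows into disjoint intervals that are flattened in order
-- (objective: faster — no per-element set insertions, no final sort of the output).

-- ===== PORT A =====
def expand_context_py (matched : List Int) (ctx : Int) (total_lines : Int) : List Int :=
  if ctx ≤ 0 then matched
  else
    -- wanted: set[int]; for i in matched: wanted.update(range(lo, hi+1))
    let wanted : PySem.Set Int :=
      matched.foldl (fun s i =>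
        PySem.Set.update s
          (PySem.List.pyRange (max 0 (i - ctx)) (min (total_lines - 1) (i + ctx) + 1) 1))
        PySem.Set.empty
    PySem.List.sorted wanted (fun x => x)

-- ===== PORT B =====
-- the interval accumulator is kept most-recent-first (Lean's cons models Python's
-- append + intervals[-1] access); it is reversed before flattening
def expand_context_py_alt_step (ctx total_lines : Int) (acc : List (Int × Int)) (i : Int) :
    List (Int × Int) :=
  let lo := max 0 (i - ctx)
  let hi := min (total_lines - 1) (i + ctx)
  if hi < lo then acc
  else
    match acc with
    | [] => [(lo, hi)]
    | (plo, phi) :: rest =>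
      if lo ≤ phi + 1 then (plo, if phi < hi then hi else phi) :: rest
      else (lo, hi) :: (plo, phi) :: rest

def expand_context_py_alt (matched : List Int) (ctx : Int) (total_lines : Int) : List Int :=
  if ctx ≤ 0 then matched
  else
    let intervals :=
      (PySem.List.sorted matched (fun x => x)).foldl
        (expand_context_py_alt_step ctx total_lines) []
    intervals.reverse.foldl
      (fun out p => out ++ PySem.List.pyRange p.1 (p.2 + 1) 1) []

-- ===== PRECONDITION & SPEC =====
def Spec_expand_context_py (matched : List Int) (ctx : Int) (total_lines : Int) (out : List Int) : Prop := out = expand_context_py_alt matched ctx total_lines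
instance (matched : List Int) (ctx : Int) (total_lines : Int) (out : List Int) : Decidable (Spec_expand_context_py matched ctx total_lines out) := by unfold Spec_expand_context_py; infer_instance

-- ===== CLAIM (what is proved, stated in full; the proofs are below) =====
def Claim_equal_expand_context_py : Prop := ∀ (matched : List Int) (ctx : Int) (total_lines : Int), Dom_expand_context_py matched ctx total_lines → Spec_expand_context_py matched ctx total_lines (expand_context_py matched ctx total_lines)

-- ===== LEMMAS AND PROOFS =====

-- the set of line numbers an interval accumulator covers
def pvCover (acc : List (Int × Int)) (n : Int) : Prop := ∃ p ∈ acc, p.1 ≤ n ∧ n ≤ p.2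

-- invariant of B's accumulator: nonempty intervals, strictly separated (most-recent-first)
def pvGood (acc : List (Int × Int)) : Prop :=
  (∀ p ∈ acc, p.1 ≤ p.2) ∧ acc.Pairwise (fun a b => b.2 + 1 < a.1)

lemma pv_fold_inv (ctx total_lines : Int) (xs : List Int)
    (hxs : xs.Pairwise (· ≤ ·)) :
    ∀ acc, pvGood acc →
      (∀ i ∈ xs, ∀ p ∈ acc, p.1 ≤ max 0 (i - ctx)) →
      pvGood (xs.foldl (expand_context_py_alt_step ctx total_lines) acc) ∧
      (∀ n, pvCover (xs.foldl (expand_context_py_alt_step ctx total_lines) acc) n ↔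
        pvCover acc n ∨
          ∃ i ∈ xs, max 0 (i - ctx) ≤ n ∧ n ≤ min (total_lines - 1) (i + ctx)) := by
  induction xs with
  | nil => intro acc hg _; simpa [pvCover] using hg
  | cons i xs ih =>
    intro acc hg hlo
    obtain ⟨hhead, htail⟩ := List.pairwise_cons.mp hxs
    set lo := max 0 (i - ctx) with hlo_def
    set hi := min (total_lines - 1) (i + ctx) with hhi_def
    have step_eq : ∀ a, expand_context_py_alt_step ctx total_lines a i =
        (if hi < lo then a else
          match a with
          | [] => [(lo, hi)]
          | (plo, phi) :: rest =>
            if lo ≤ phi + 1 then (plo, if phi < hi then hi else phi) :: rest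
            else (lo, hi) :: (plo, phi) :: rest) := by
      intro a; rfl
    by_cases hempty : hi < lo
    · -- clamped window empty: accumulator unchanged, window contributes nothing
      have h1 := ih htail acc hg (fun j hj p hp => hlo j (List.mem_cons_of_mem _ hj) p hp)
      simp only [List.foldl_cons, step_eq, if_pos hempty]
      refine ⟨h1.1, fun n => ?_⟩
      rw [h1.2 n]
      constructor
      · rintro (h | ⟨j, hj, hjn⟩); · exact Or.inl h
        · exact Or.inr ⟨j, List.mem_cons_of_mem _ hj, hjn⟩
      · rintro (h | ⟨j, hj, hjn⟩); · exact Or.inl h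
        rcases List.mem_cons.mp hj with rfl | hj
        · omega
        · exact Or.inr ⟨j, hj, hjn⟩
    · push Not at hempty
      -- the new accumulator after absorbing i's window
      have key : ∀ acc', acc' = expand_context_py_alt_step ctx total_lines acc i →
          pvGood acc' ∧ (∀ j ∈ xs, ∀ p ∈ acc', p.1 ≤ max 0 (j - ctx)) ∧
          (∀ n, pvCover acc' n ↔ pvCover acc n ∨ (lo ≤ n ∧ n ≤ hi)) := by
        intro acc' hacc'
        rw [step_eq, if_neg (by omega)] at hacc'
        match acc, hg, hlo with
        | [], _, _ =>
          subst hacc'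
          refine ⟨⟨by simpa using hempty, by simp⟩, ?_, ?_⟩
          · intro j hj p hp
            simp only [List.mem_singleton] at hp; subst hp
            have := hhead j hj; simp only [hlo_def]; omega
          · intro n; simp [pvCover]
        | (plo, phi) :: rest, hg, hlo =>
          simp only at hacc'
          have hplophi : plo ≤ phi := hg.1 _ (List.mem_cons_self ..)
          have hplolo : plo ≤ lo :=
            hlo i (List.mem_cons_self ..) (plo, phi) (List.mem_cons_self ..)
          have hsep : ∀ p ∈ rest, p.2 + 1 < plo :=
            fun p hp => (List.pairwise_cons.mp hg.2).1 p hp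
          by_cases hmerge : lo ≤ phi + 1
          · rw [if_pos hmerge] at hacc'
            subst hacc'
            refine ⟨⟨?_, ?_⟩, ?_, ?_⟩
            · intro p hp
              rcases List.mem_cons.mp hp with rfl | hp
              · simp only; split_ifs <;> omega
              · exact hg.1 p (List.mem_cons_of_mem _ hp)
            · refine List.pairwise_cons.mpr ⟨fun p hp => ?_, (List.pairwise_cons.mp hg.2).2⟩
              exact hsep p hp
            · intro j hj p hp
              rcases List.mem_cons.mp hp with rfl | hp
              · simpa using hlo j (List.mem_cons_of_mem _ hj) (plo, phi)
                  (List.mem_cons_self ..)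
              · exact hlo j (List.mem_cons_of_mem _ hj) p (List.mem_cons_of_mem _ hp)
            · intro n
              constructor
              · rintro ⟨p, hp, hn⟩
                rcases List.mem_cons.mp hp with rfl | hp
                · simp only at hn
                  by_cases hn2 : n ≤ phi
                  · exact Or.inl ⟨(plo, phi), List.mem_cons_self .., hn.1, hn2⟩
                  · right; constructor <;> [skip; skip] <;>
                      (revert hn; split_ifs <;> omega)
                · exact Or.inl ⟨p, List.mem_cons_of_mem _ hp, hn⟩
              · rintro (⟨p, hp, hn⟩ | hn)
                · rcases List.mem_cons.mp hp with rfl | hp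
                  · refine ⟨(plo, if phi < hi then hi else phi), List.mem_cons_self .., ?_⟩
                    simp only at hn ⊢; split_ifs <;> omega
                  · exact ⟨p, List.mem_cons_of_mem _ hp, hn⟩
                · refine ⟨(plo, if phi < hi then hi else phi), List.mem_cons_self .., ?_⟩
                  simp only; split_ifs <;> omega
          · rw [if_neg hmerge] at hacc'
            subst hacc'
            push Not at hmerge
            refine ⟨⟨?_, ?_⟩, ?_, ?_⟩
            · intro p hp
              rcases List.mem_cons.mp hp with rfl | hp
              · exact hempty
              · exact hg.1 p hp
            · refine List.pairwise_cons.mpr ⟨fun p hp => ?_, hg.2⟩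
              rcases List.mem_cons.mp hp with rfl | hp
              · simpa using hmerge
              · have := hsep p hp; simp only; omega
            · intro j hj p hp
              rcases List.mem_cons.mp hp with rfl | hp
              · have := hhead j hj; simp only [hlo_def]; omega
              · exact hlo j (List.mem_cons_of_mem _ hj) p hp
            · intro n
              constructor
              · rintro ⟨p, hp, hn⟩
                rcases List.mem_cons.mp hp with rfl | hp
                · exact Or.inr hn
                · exact Or.inl ⟨p, hp, hn⟩
              · rintro (⟨p, hp, hn⟩ | hn)
                · exact ⟨p, List.mem_cons_of_mem _ hp, hn⟩
                · exact ⟨(lo, hi), List.mem_cons_self .., hn⟩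
      obtain ⟨hg', hlo', hcov'⟩ := key _ rfl
      have h1 := ih htail _ hg' hlo'
      simp only [List.foldl_cons]
      refine ⟨h1.1, fun n => ?_⟩
      rw [h1.2 n, hcov' n]
      constructor
      · rintro ((h | h) | ⟨j, hj, hjn⟩)
        · exact Or.inl h
        · exact Or.inr ⟨i, List.mem_cons_self .., h⟩
        · exact Or.inr ⟨j, List.mem_cons_of_mem _ hj, hjn⟩
      · rintro (h | ⟨j, hj, hjn⟩)
        · exact Or.inl (Or.inl h)
        · rcases List.mem_cons.mp hj with rfl | hj
          · exact Or.inl (Or.inr hjn)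
          · exact Or.inr ⟨j, hj, hjn⟩

lemma pv_mem_flat (l : List (Int × Int)) (n : Int) :
    n ∈ List.flatMap (fun p : Int × Int => PySem.List.pyRange p.1 (p.2 + 1) 1) l ↔
      ∃ p ∈ l, p.1 ≤ n ∧ n ≤ p.2 := by
  simp only [List.mem_flatMap, PySem.List.mem_pyRange_one]
  constructor
  · rintro ⟨p, hp, h1, h2⟩; exact ⟨p, hp, h1, by omega⟩
  · rintro ⟨p, hp, h1, h2⟩; exact ⟨p, hp, h1, by omega⟩

lemma pv_pairwise_flat (l : List (Int × Int))
    (h : l.Pairwise (fun a b => a.2 + 1 < b.1)) :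
    (List.flatMap (fun p : Int × Int => PySem.List.pyRange p.1 (p.2 + 1) 1) l).Pairwise
      (· < ·) := by
  induction l with
  | nil => simp
  | cons p l ih =>
    obtain ⟨hp, hl⟩ := List.pairwise_cons.mp h
    rw [List.flatMap_cons, List.pairwise_append]
    refine ⟨PySem.List.pairwise_lt_pyRange_one _ _, ih hl, ?_⟩
    intro a ha b hb
    rw [PySem.List.mem_pyRange_one] at ha
    rw [pv_mem_flat] at hb
    obtain ⟨q, hq, hb1, _⟩ := hb
    have := hp q hq
    omega

lemma pv_mem_wanted (matched : List Int) (ctx total_lines : Int) (n : Int) :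
    n ∈ matched.foldl (fun s i =>
        PySem.Set.update s
          (PySem.List.pyRange (max 0 (i - ctx)) (min (total_lines - 1) (i + ctx) + 1) 1))
        PySem.Set.empty ↔
      ∃ i ∈ matched, max 0 (i - ctx) ≤ n ∧ n ≤ min (total_lines - 1) (i + ctx) := by
  have main : ∀ (s : PySem.Set Int),
      n ∈ matched.foldl (fun s i =>
        PySem.Set.update s
          (PySem.List.pyRange (max 0 (i - ctx)) (min (total_lines - 1) (i + ctx) + 1) 1)) s ↔
        n ∈ s ∨ ∃ i ∈ matched, max 0 (i - ctx) ≤ n ∧ n ≤ min (total_lines - 1) (i + ctx) := by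
    induction matched with
    | nil => intro s; simp
    | cons i l ih =>
      intro s
      simp only [List.foldl_cons]
      rw [ih, PySem.Set.mem_update, PySem.List.mem_pyRange_one]
      constructor
      · rintro ((h | h) | ⟨j, hj, hjn⟩)
        · exact Or.inl h
        · exact Or.inr ⟨i, List.mem_cons_self .., by omega⟩
        · exact Or.inr ⟨j, List.mem_cons_of_mem _ hj, hjn⟩
      · rintro (h | ⟨j, hj, hjn⟩)
        · exact Or.inl (Or.inl h)
        · rcases List.mem_cons.mp hj with rfl | hj
          · exact Or.inl (Or.inr (by omega))
          · exact Or.inr ⟨j, hj, hjn⟩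
  rw [main PySem.Set.empty]
  simp [PySem.Set.empty]

lemma pv_nodup_wanted (matched : List Int) (ctx total_lines : Int) :
    List.Nodup (matched.foldl (fun s i =>
      PySem.Set.update s
        (PySem.List.pyRange (max 0 (i - ctx)) (min (total_lines - 1) (i + ctx) + 1) 1))
      PySem.Set.empty) := by
  have main : ∀ (s : PySem.Set Int), List.Nodup s →
      List.Nodup (matched.foldl (fun s i =>
        PySem.Set.update s
          (PySem.List.pyRange (max 0 (i - ctx)) (min (total_lines - 1) (i + ctx) + 1) 1)) s) := by
    induction matched with
    | nil => intro s hs; simpa using hs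
    | cons i l ih =>
      intro s hs
      simp only [List.foldl_cons]
      exact ih _ (PySem.Set.nodup_update s _ hs)
  exact main PySem.Set.empty (by simp [PySem.Set.empty])

-- ===== VERDICT (by name: the statement is the Claim_ definition above) =====
theorem expand_context_py_spec : Claim_equal_expand_context_py := by
  intro matched ctx total_lines _
  unfold Spec_expand_context_py expand_context_py expand_context_py_alt
  by_cases hctx : ctx ≤ 0
  · simp [hctx]
  · simp only [if_neg hctx]
    set xs := PySem.List.sorted matched (fun x : Int => x) with hxs_def
    have hxs : xs.Pairwise (· ≤ ·) := by
      simpa using PySem.List.sorted_pairwise matched (fun x : Int => x)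
    set ints := xs.foldl (expand_context_py_alt_step ctx total_lines) [] with hints_def
    obtain ⟨hgood, hcov⟩ := pv_fold_inv ctx total_lines xs hxs []
      ⟨by simp, by simp⟩ (by simp)
    rw [← hints_def] at hgood hcov
    have hflat : ints.reverse.foldl
        (fun out p => out ++ PySem.List.pyRange p.1 (p.2 + 1) 1) [] =
        List.flatMap (fun p : Int × Int => PySem.List.pyRange p.1 (p.2 + 1) 1)
          ints.reverse := by
      simpa using PySem.List.foldl_append_eq_flatMap
        (fun p : Int × Int => PySem.List.pyRange p.1 (p.2 + 1) 1) ints.reverse []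
    set B := List.flatMap (fun p : Int × Int => PySem.List.pyRange p.1 (p.2 + 1) 1)
      ints.reverse with hB_def
    have hBpair : B.Pairwise (· < ·) :=
      pv_pairwise_flat _ (List.pairwise_reverse.mpr hgood.2)
    have hBmem : ∀ n, n ∈ B ↔
        ∃ i ∈ matched, max 0 (i - ctx) ≤ n ∧ n ≤ min (total_lines - 1) (i + ctx) := by
      intro n
      rw [hB_def, pv_mem_flat]
      have : (∃ p ∈ ints.reverse, p.1 ≤ n ∧ n ≤ p.2) ↔ pvCover ints n := by
        unfold pvCover; simp
      rw [this, hcov n]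
      simp only [pvCover, List.not_mem_nil, false_and, exists_false, false_or]
      constructor
      · rintro ⟨i, hi, h⟩
        exact ⟨i, (PySem.List.mem_sorted matched _ _ i).mp hi, h⟩
      · rintro ⟨i, hi, h⟩
        exact ⟨i, (PySem.List.mem_sorted matched _ _ i).mpr hi, h⟩
    rw [hflat]
    set wanted := matched.foldl (fun s i =>
      PySem.Set.update s
        (PySem.List.pyRange (max 0 (i - ctx)) (min (total_lines - 1) (i + ctx) + 1) 1))
      PySem.Set.empty with hw_def
    have hwnodup : List.Nodup wanted := pv_nodup_wanted matched ctx total_lines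
    apply PySem.List.sorted_id_eq_of_perm_of_pairwise
    · rw [List.perm_ext_iff_of_nodup (hBpair.imp ne_of_lt) hwnodup]
      intro n
      rw [hBmem n]
      constructor
      · intro h
        exact (pv_mem_wanted matched ctx total_lines n).mpr h
      · intro h
        exact (pv_mem_wanted matched ctx total_lines n).mp h
    · exact hBpair.imp le_of_lt
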